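-- pv_equiv track=rewrite | github.com/Enjef/Algo | 2200 - 2299/2257 - Count Unguarded Cells in the Grid/2257 - Count Unguarded Cells in the Grid.py | countUnguarded_v2
-- ===== SOURCE A (Python) =====
-- from typing import List
--
-- def countUnguarded_v2(m: int, n: int, guards: List[List[int]], walls: List[List[int]]) -> int:
--     def helper(x, y):
--         xx = x - 1
--         while xx > -1 and (xx, y) not in guard and (xx, y) not in wall:
--             guarded.add((xx, y))
--             xx -= 1
--         yy = y - 1
--         while yy > -1 and (x, yy) not in guard and (x, yy) not in wall:
--             guarded.add((x, yy))
--             yy -= 1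
--         xx = x + 1
--         while xx < m and (xx, y) not in guard and (xx, y) not in wall:
--             guarded.add((xx, y))
--             xx += 1
--         yy = y + 1
--         while yy < n and (x, yy) not in guard and (x, yy) not in wall:
--             guarded.add((x, yy))
--             yy += 1
--         return
--
--     guard = {(x, y) for x, y in guards}
--     wall = {(x, y) for x, y in walls}
--     guarded = set()
--     for i in range(m):
--         for j in range(n):
--             if (i, j) in guard:
--                 helper(i, j)
--     return m * n - len(guard) - len(wall) - len(guarded)
-- ===== SOURCE B (Python) =====
-- def countUnguarded_v2(m, n, guards, walls):
--     guard = {(x, y) for x, y in guards}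
--     wall = {(x, y) for x, y in walls}
--     guarded = set()
--
--     def sweep(length, cell):
--         active = False
--         for t in range(length):
--             c = cell(t)
--             if c in guard:
--                 active = True
--             elif c in wall:
--                 active = False
--             elif active:
--                 guarded.add(c)
--
--     for i in range(m):
--         sweep(n, lambda t: (i, t))
--         sweep(n, lambda t: (i, n - 1 - t))
--     for j in range(n):
--         sweep(m, lambda t: (t, j))
--         sweep(m, lambda t: (m - 1 - t, j))
--     return m * n - len(guard) - len(wall) - len(guarded)
-- ===== Notes on version B (the rewrite author's own statement) =====
-- stated objective: alternative
-- what changed: B replaces A's per-guard ray shooting (four while-loops from every guard cell) with four whole-grid row/column sweeps that carry an 'active' visibility flag, so the work is O(m*n) regardless of how many guards there are.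
import Mathlib
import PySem

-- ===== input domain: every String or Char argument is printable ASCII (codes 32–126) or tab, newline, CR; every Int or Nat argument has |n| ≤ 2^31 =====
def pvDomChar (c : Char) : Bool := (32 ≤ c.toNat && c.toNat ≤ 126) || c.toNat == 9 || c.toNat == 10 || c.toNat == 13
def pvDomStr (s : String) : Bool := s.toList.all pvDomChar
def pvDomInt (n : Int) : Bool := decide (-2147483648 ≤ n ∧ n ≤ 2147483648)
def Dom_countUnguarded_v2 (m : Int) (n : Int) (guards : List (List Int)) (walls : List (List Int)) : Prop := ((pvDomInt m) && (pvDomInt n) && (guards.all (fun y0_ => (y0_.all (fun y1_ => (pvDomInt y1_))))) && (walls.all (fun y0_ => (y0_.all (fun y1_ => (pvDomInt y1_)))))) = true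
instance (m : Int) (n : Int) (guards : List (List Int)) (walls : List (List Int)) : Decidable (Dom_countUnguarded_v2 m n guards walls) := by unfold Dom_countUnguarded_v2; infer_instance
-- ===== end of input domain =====

-- B replaces A's per-guard ray shooting with four whole-grid sweeps carrying an 'active' flag;
-- objective: alternative (O(m*n) sweeps independent of the number of guards).

-- shared helper: '{(x, y) for x, y in rows}' (both Pythons build guard/wall this way;
-- under Pre_ every row has length 2, so the pyGetD defaults are never used)
def pvPairs (rows : List (List Int)) : PySem.Set (Int × Int) :=
  PySem.Set.ofList (rows.map (fun r => (PySem.List.pyGetD r 0 0, PySem.List.pyGetD r 1 0)))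

-- '(c) not in guard and (c) not in wall'
def pvFree (g w : PySem.Set (Int × Int)) (c : Int × Int) : Bool :=
  !(PySem.Set.contains g c) && !(PySem.Set.contains w c)

-- ===== PORT A =====
-- one of A's four while-loops: walk cell 0, cell 1, … while in range and free, adding each
def pvRay (g w : PySem.Set (Int × Int)) (steps : Int) (cell : Int → Int × Int)
    (s : PySem.Set (Int × Int)) : PySem.Set (Int × Int) :=
  if h : steps ≤ 0 then s
  else if pvFree g w (cell 0) then
    pvRay g w (steps - 1) (fun t => cell (t + 1)) (PySem.Set.add s (cell 0))
  else s
termination_by steps.toNat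
decreasing_by omega

-- A's 'helper(x, y)': the four rays in source order (left, down, right, up)
def pvHelperA (g w : PySem.Set (Int × Int)) (m n x y : Int)
    (s : PySem.Set (Int × Int)) : PySem.Set (Int × Int) :=
  let s1 := pvRay g w x (fun t => (x - 1 - t, y)) s
  let s2 := pvRay g w y (fun t => (x, y - 1 - t)) s1
  let s3 := pvRay g w (m - 1 - x) (fun t => (x + 1 + t, y)) s2
  pvRay g w (n - 1 - y) (fun t => (x, y + 1 + t)) s3

def countUnguarded_v2 (m : Int) (n : Int) (guards : List (List Int)) (walls : List (List Int)) : Int :=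
  let guard := pvPairs guards
  let wall := pvPairs walls
  let guarded := (PySem.List.pyRange 0 m 1).foldl (fun s i =>
      (PySem.List.pyRange 0 n 1).foldl (fun s j =>
        if PySem.Set.contains guard (i, j) then pvHelperA guard wall m n i j s else s) s)
    PySem.Set.empty
  m * n - PySem.Set.len guard - PySem.Set.len wall - PySem.Set.len guarded

-- ===== PORT B =====
-- B's 'sweep(length, cell)': one pass over cell 0 … cell (length-1) with an 'active' flag
def pvSweep (g w : PySem.Set (Int × Int)) (len : Int) (cell : Int → Int × Int)
    (active : Bool) (s : PySem.Set (Int × Int)) : PySem.Set (Int × Int) :=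
  if h : len ≤ 0 then s
  else if PySem.Set.contains g (cell 0) then
    pvSweep g w (len - 1) (fun t => cell (t + 1)) true s
  else if PySem.Set.contains w (cell 0) then
    pvSweep g w (len - 1) (fun t => cell (t + 1)) false s
  else
    pvSweep g w (len - 1) (fun t => cell (t + 1)) active
      (if active then PySem.Set.add s (cell 0) else s)
termination_by len.toNat
decreasing_by all_goals omega

def countUnguarded_v2_alt (m : Int) (n : Int) (guards : List (List Int)) (walls : List (List Int)) : Int :=
  let guard := pvPairs guards
  let wall := pvPairs walls
  let s1 := (PySem.List.pyRange 0 m 1).foldl (fun s i =>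
      pvSweep guard wall n (fun t => (i, n - 1 - t)) false
        (pvSweep guard wall n (fun t => (i, t)) false s)) PySem.Set.empty
  let guarded := (PySem.List.pyRange 0 n 1).foldl (fun s j =>
      pvSweep guard wall m (fun t => (m - 1 - t, j)) false
        (pvSweep guard wall m (fun t => (t, j)) false s)) s1
  m * n - PySem.Set.len guard - PySem.Set.len wall - PySem.Set.len guarded

-- ===== PRECONDITION & SPEC =====
-- Pre_ excludes exactly the inputs where 'for x, y in guards/walls' raises ValueError
-- (a row whose length is not 2); both A and B raise there.
def Pre_countUnguarded_v2 (m : Int) (n : Int) (guards : List (List Int)) (walls : List (List Int)) : Prop :=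
  (∀ r ∈ guards, r.length = 2) ∧ (∀ r ∈ walls, r.length = 2)
instance (m : Int) (n : Int) (guards : List (List Int)) (walls : List (List Int)) : Decidable (Pre_countUnguarded_v2 m n guards walls) := by unfold Pre_countUnguarded_v2; infer_instance

def pvWitness_countUnguarded_v2 : Int × Int × List (List Int) × List (List Int) :=
  (3, 3, [[1, 1]], [[0, 1]])

def Spec_countUnguarded_v2 (m : Int) (n : Int) (guards : List (List Int)) (walls : List (List Int)) (out : Int) : Prop := out = countUnguarded_v2_alt m n guards walls
instance (m : Int) (n : Int) (guards : List (List Int)) (walls : List (List Int)) (out : Int) : Decidable (Spec_countUnguarded_v2 m n guards walls out) := by unfold Spec_countUnguarded_v2; infer_instance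

-- ===== CLAIM (what is proved, stated in full; the proofs are below) =====
def Claim_equal_countUnguarded_v2 : Prop := ∀ (m : Int) (n : Int) (guards : List (List Int)) (walls : List (List Int)), Dom_countUnguarded_v2 m n guards walls → Pre_countUnguarded_v2 m n guards walls → Spec_countUnguarded_v2 m n guards walls (countUnguarded_v2 m n guards walls)

-- ===== LEMMAS AND PROOFS =====

-- propositional form of pvFree
def pvFreeP (g w : List (Int × Int)) (c : Int × Int) : Prop := c ∉ g ∧ c ∉ w

lemma pvFree_iff (g w : PySem.Set (Int × Int)) (c : Int × Int) :
    pvFree g w c = true ↔ pvFreeP g w c := by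
  simp [pvFree, pvFreeP]

-- visibility predicates (the common specification both programs compute)
def SeesV (g w : List (Int × Int)) (m : Int) (c : Int × Int) : Prop :=
  ∃ gx, 0 ≤ gx ∧ gx < m ∧ (gx, c.2) ∈ g ∧
    ((gx < c.1 ∧ ∀ k, gx < k → k < c.1 → pvFreeP g w (k, c.2)) ∨
     (c.1 < gx ∧ ∀ k, c.1 < k → k < gx → pvFreeP g w (k, c.2)))

def SeesH (g w : List (Int × Int)) (n : Int) (c : Int × Int) : Prop :=
  ∃ gy, 0 ≤ gy ∧ gy < n ∧ (c.1, gy) ∈ g ∧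
    ((gy < c.2 ∧ ∀ k, gy < k → k < c.2 → pvFreeP g w (c.1, k)) ∨
     (c.2 < gy ∧ ∀ k, c.2 < k → k < gy → pvFreeP g w (c.1, k)))

def GP (g w : List (Int × Int)) (m n : Int) (c : Int × Int) : Prop :=
  (0 ≤ c.1 ∧ c.1 < m ∧ 0 ≤ c.2 ∧ c.2 < n) ∧ pvFreeP g w c ∧
    (SeesV g w m c ∨ SeesH g w n c)

-- membership through pvRay
lemma mem_pvRay (g w : PySem.Set (Int × Int)) :
    ∀ (steps : Int) (cell : Int → Int × Int) (s : PySem.Set (Int × Int)) (c : Int × Int),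
    c ∈ pvRay g w steps cell s ↔ c ∈ s ∨
      ∃ t, 0 ≤ t ∧ t < steps ∧ c = cell t ∧ ∀ k, 0 ≤ k → k ≤ t → pvFreeP g w (cell k) := by
  intro steps cell s c
  fun_induction pvRay g w steps cell s with
  | case1 steps cell s h =>
    constructor
    · exact Or.inl
    · rintro (h1 | ⟨t, ht0, ht1, _⟩)
      · exact h1
      · omega
  | case2 steps cell s h hf ih =>
    rw [ih]
    have hfree : pvFreeP g w (cell 0) := (pvFree_iff g w _).mp hf
    simp only [PySem.Set.mem_add]
    constructor
    · rintro ((h1 | h1) | ⟨t, ht0, ht1, rfl, hch⟩)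
      · exact Or.inl h1
      · refine Or.inr ⟨0, le_refl 0, by omega, h1, ?_⟩
        intro k hk0 hk1
        have hk : k = 0 := by omega
        rw [hk]; exact hfree
      · refine Or.inr ⟨t + 1, by omega, by omega, rfl, ?_⟩
        intro k hk0 hk1
        by_cases hk : k = 0
        · rw [hk]; exact hfree
        · have e : k - 1 + 1 = k := by omega
          rw [← e]; exact hch (k - 1) (by omega) (by omega)
    · rintro (h1 | ⟨t, ht0, ht1, rfl, hch⟩)
      · exact Or.inl (Or.inl h1)
      · by_cases ht : t = 0
        · rw [ht]; exact Or.inl (Or.inr rfl)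
        · refine Or.inr ⟨t - 1, by omega, by omega, by rw [show t - 1 + 1 = t by omega], ?_⟩
          intro k hk0 hk1
          exact hch (k + 1) (by omega) (by omega)
  | case3 steps cell s h hf =>
    have hnf : ¬ pvFreeP g w (cell 0) := fun hp => hf ((pvFree_iff g w _).mpr hp)
    constructor
    · exact Or.inl
    · rintro (h1 | ⟨t, ht0, ht1, rfl, hch⟩)
      · exact h1
      · exact (hnf (hch 0 le_rfl ht0)).elim

-- membership through pvSweep (general 'active')
lemma mem_pvSweep (g w : PySem.Set (Int × Int)) :
    ∀ (len : Int) (cell : Int → Int × Int) (active : Bool) (s : PySem.Set (Int × Int)) (c : Int × Int),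
    c ∈ pvSweep g w len cell active s ↔ c ∈ s ∨
      ∃ t, 0 ≤ t ∧ t < len ∧ c = cell t ∧ pvFreeP g w (cell t) ∧
        ((active = true ∧ ∀ k, 0 ≤ k → k < t → pvFreeP g w (cell k)) ∨
         (∃ u, 0 ≤ u ∧ u < t ∧ cell u ∈ g ∧ ∀ k, u < k → k < t → pvFreeP g w (cell k))) := by
  intro len cell active s c
  fun_induction pvSweep g w len cell active s with
  | case1 len cell active s h =>
    constructor
    · exact Or.inl
    · rintro (h1 | ⟨t, ht0, ht1, _⟩)
      · exact h1
      · omega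
  | case2 len cell active s h hg ih =>
    have hg' : cell 0 ∈ g := (PySem.Set.contains_iff g _).mp hg
    have hnf : ¬ pvFreeP g w (cell 0) := fun hp => hp.1 hg'
    rw [ih]
    beta_reduce
    constructor
    · rintro (h1 | ⟨t, ht0, ht1, rfl, hfr, hcond⟩)
      · exact Or.inl h1
      · refine Or.inr ⟨t + 1, by omega, by omega, rfl, hfr, ?_⟩
        rcases hcond with ⟨_, hch⟩ | ⟨u, hu0, hu1, hug, hch⟩
        · refine Or.inr ⟨0, le_rfl, by omega, hg', ?_⟩
          intro k hk0 hk1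
          rw [show k = k - 1 + 1 by omega]
          exact hch (k - 1) (by omega) (by omega)
        · refine Or.inr ⟨u + 1, by omega, by omega, hug, ?_⟩
          intro k hk0 hk1
          rw [show k = k - 1 + 1 by omega]
          exact hch (k - 1) (by omega) (by omega)
    · rintro (h1 | ⟨t, ht0, ht1, rfl, hfr, hcond⟩)
      · exact Or.inl h1
      · by_cases ht : t = 0
        · rw [ht] at hfr; exact (hnf hfr).elim
        · refine Or.inr ⟨t - 1, by omega, by omega, by rw [show t - 1 + 1 = t by omega], by rw [show t - 1 + 1 = t by omega]; exact hfr, ?_⟩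
          rcases hcond with ⟨ha, hch⟩ | ⟨u, hu0, hu1, hug, hch⟩
          · exact (hnf (hch 0 le_rfl (by omega))).elim
          · by_cases hu : u = 0
            · refine Or.inl ⟨rfl, ?_⟩
              intro k hk0 hk1
              exact hch (k + 1) (by omega) (by omega)
            · refine Or.inr ⟨u - 1, by omega, by omega, by rw [show u - 1 + 1 = u by omega]; exact hug, ?_⟩
              intro k hk0 hk1
              exact hch (k + 1) (by omega) (by omega)
  | case3 len cell active s h hg hw ih =>
    have hng : cell 0 ∉ g := fun hmem => hg ((PySem.Set.contains_iff g _).mpr hmem)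
    have hw' : cell 0 ∈ w := (PySem.Set.contains_iff w _).mp hw
    have hnf : ¬ pvFreeP g w (cell 0) := fun hp => hp.2 hw'
    rw [ih]
    beta_reduce
    constructor
    · rintro (h1 | ⟨t, ht0, ht1, rfl, hfr, hcond⟩)
      · exact Or.inl h1
      · refine Or.inr ⟨t + 1, by omega, by omega, rfl, hfr, ?_⟩
        rcases hcond with ⟨ha, hch⟩ | ⟨u, hu0, hu1, hug, hch⟩
        · exact absurd ha (by simp)
        · refine Or.inr ⟨u + 1, by omega, by omega, hug, ?_⟩
          intro k hk0 hk1
          rw [show k = k - 1 + 1 by omega]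
          exact hch (k - 1) (by omega) (by omega)
    · rintro (h1 | ⟨t, ht0, ht1, rfl, hfr, hcond⟩)
      · exact Or.inl h1
      · by_cases ht : t = 0
        · rw [ht] at hfr; exact (hnf hfr).elim
        · refine Or.inr ⟨t - 1, by omega, by omega, by rw [show t - 1 + 1 = t by omega], by rw [show t - 1 + 1 = t by omega]; exact hfr, ?_⟩
          rcases hcond with ⟨ha, hch⟩ | ⟨u, hu0, hu1, hug, hch⟩
          · exact (hnf (hch 0 le_rfl (by omega))).elim
          · by_cases hu : u = 0
            · rw [hu] at hug; exact (hng hug).elim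
            · refine Or.inr ⟨u - 1, by omega, by omega, by rw [show u - 1 + 1 = u by omega]; exact hug, ?_⟩
              intro k hk0 hk1
              exact hch (k + 1) (by omega) (by omega)
  | case4 len cell active s h hg hw ih =>
    have hng : cell 0 ∉ g := fun hmem => hg ((PySem.Set.contains_iff g _).mpr hmem)
    have hnw : cell 0 ∉ w := fun hmem => hw ((PySem.Set.contains_iff w _).mpr hmem)
    have hfree : pvFreeP g w (cell 0) := ⟨hng, hnw⟩
    have hs' : ∀ d : Int × Int, d ∈ (if active then PySem.Set.add s (cell 0) else s) ↔
        d ∈ s ∨ (active = true ∧ d = cell 0) := by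
      cases active <;> simp [PySem.Set.mem_add]
    simp only [dite_eq_ite] at ih
    rw [ih]
    constructor
    · rintro (h1 | ⟨t, ht0, ht1, rfl, hfr, hcond⟩)
      · rcases (hs' _).mp h1 with h2 | ⟨ha, h2⟩
        · exact Or.inl h2
        · refine Or.inr ⟨0, le_rfl, by omega, h2, hfree, Or.inl ⟨ha, ?_⟩⟩
          intro k hk0 hk1; omega
      · refine Or.inr ⟨t + 1, by omega, by omega, rfl, hfr, ?_⟩
        rcases hcond with ⟨ha, hch⟩ | ⟨u, hu0, hu1, hug, hch⟩
        · refine Or.inl ⟨ha, ?_⟩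
          intro k hk0 hk1
          by_cases hk : k = 0
          · rw [hk]; exact hfree
          · rw [show k = k - 1 + 1 by omega]
            exact hch (k - 1) (by omega) (by omega)
        · refine Or.inr ⟨u + 1, by omega, by omega, hug, ?_⟩
          intro k hk0 hk1
          rw [show k = k - 1 + 1 by omega]
          exact hch (k - 1) (by omega) (by omega)
    · rintro (h1 | ⟨t, ht0, ht1, rfl, hfr, hcond⟩)
      · exact Or.inl ((hs' _).mpr (Or.inl h1))
      · by_cases ht : t = 0
        · rw [ht] at hcond
          rcases hcond with ⟨ha, _⟩ | ⟨u, hu0, hu1, _⟩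
          · refine Or.inl ((hs' _).mpr (Or.inr ⟨ha, by rw [ht]⟩))
          · omega
        · refine Or.inr ⟨t - 1, by omega, by omega, by rw [show t - 1 + 1 = t by omega], by rw [show t - 1 + 1 = t by omega]; exact hfr, ?_⟩
          rcases hcond with ⟨ha, hch⟩ | ⟨u, hu0, hu1, hug, hch⟩
          · refine Or.inl ⟨ha, ?_⟩
            intro k hk0 hk1
            exact hch (k + 1) (by omega) (by omega)
          · by_cases hu : u = 0
            · rw [hu] at hug; exact (hng hug).elim
            · refine Or.inr ⟨u - 1, by omega, by omega, by rw [show u - 1 + 1 = u by omega]; exact hug, ?_⟩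
              intro k hk0 hk1
              exact hch (k + 1) (by omega) (by omega)

lemma mem_pvSweep_false (g w : PySem.Set (Int × Int)) (len : Int) (cell : Int → Int × Int)
    (s : PySem.Set (Int × Int)) (c : Int × Int) :
    c ∈ pvSweep g w len cell false s ↔ c ∈ s ∨
      ∃ t, 0 ≤ t ∧ t < len ∧ c = cell t ∧ pvFreeP g w (cell t) ∧
        ∃ u, 0 ≤ u ∧ u < t ∧ cell u ∈ g ∧ ∀ k, u < k → k < t → pvFreeP g w (cell k) := by
  rw [mem_pvSweep]; simp

-- what pvHelperA adds
def HitA (g w : List (Int × Int)) (m n x y : Int) (c : Int × Int) : Prop :=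
  (∃ t, 0 ≤ t ∧ t < x ∧ c = (x - 1 - t, y) ∧ ∀ k, 0 ≤ k → k ≤ t → pvFreeP g w (x - 1 - k, y)) ∨
  (∃ t, 0 ≤ t ∧ t < y ∧ c = (x, y - 1 - t) ∧ ∀ k, 0 ≤ k → k ≤ t → pvFreeP g w (x, y - 1 - k)) ∨
  (∃ t, 0 ≤ t ∧ t < m - 1 - x ∧ c = (x + 1 + t, y) ∧ ∀ k, 0 ≤ k → k ≤ t → pvFreeP g w (x + 1 + k, y)) ∨
  (∃ t, 0 ≤ t ∧ t < n - 1 - y ∧ c = (x, y + 1 + t) ∧ ∀ k, 0 ≤ k → k ≤ t → pvFreeP g w (x, y + 1 + k))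

lemma mem_pvHelperA (g w : PySem.Set (Int × Int)) (m n x y : Int)
    (s : PySem.Set (Int × Int)) (c : Int × Int) :
    c ∈ pvHelperA g w m n x y s ↔ c ∈ s ∨ HitA g w m n x y c := by
  unfold pvHelperA HitA
  simp only [mem_pvRay, or_assoc]

-- membership through a foldl whose step adds according to Q
lemma mem_foldl_iff {α : Type} (f : PySem.Set (Int × Int) → α → PySem.Set (Int × Int))
    (Q : α → (Int × Int) → Prop)
    (hf : ∀ s x c, c ∈ f s x ↔ c ∈ s ∨ Q x c) :
    ∀ (l : List α) (s : PySem.Set (Int × Int)) (c : Int × Int),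
      c ∈ l.foldl f s ↔ c ∈ s ∨ ∃ x ∈ l, Q x c := by
  intro l
  induction l with
  | nil => simp
  | cons x xs ih =>
    intro s c
    simp only [List.foldl_cons, ih, hf, List.mem_cons]
    constructor
    · rintro ((h | h) | ⟨y, hy, hQ⟩)
      · exact Or.inl h
      · exact Or.inr ⟨x, Or.inl rfl, h⟩
      · exact Or.inr ⟨y, Or.inr hy, hQ⟩
    · rintro (h | ⟨y, (rfl | hy), hQ⟩)
      · exact Or.inl (Or.inl h)
      · exact Or.inl (Or.inr hQ)
      · exact Or.inr ⟨y, hy, hQ⟩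

-- nodup preservation
lemma nodup_pvRay (g w : PySem.Set (Int × Int)) :
    ∀ (steps : Int) (cell : Int → Int × Int) (s : PySem.Set (Int × Int)),
      s.Nodup → (pvRay g w steps cell s).Nodup := by
  intro steps cell s
  fun_induction pvRay g w steps cell s with
  | case1 steps cell s h => exact id
  | case2 steps cell s h hf ih => intro hs; exact ih (PySem.Set.nodup_add _ _ hs)
  | case3 steps cell s h hf => exact id

lemma nodup_pvSweep (g w : PySem.Set (Int × Int)) :
    ∀ (len : Int) (cell : Int → Int × Int) (active : Bool) (s : PySem.Set (Int × Int)),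
      s.Nodup → (pvSweep g w len cell active s).Nodup := by
  intro len cell active s
  fun_induction pvSweep g w len cell active s with
  | case1 len cell active s h => exact id
  | case2 len cell active s h hg ih => exact ih
  | case3 len cell active s h hg hw ih => exact ih
  | case4 len cell active s h hg hw ih =>
    intro hs
    apply ih
    split
    · exact PySem.Set.nodup_add _ _ hs
    · exact hs

lemma nodup_foldl {α : Type} (f : PySem.Set (Int × Int) → α → PySem.Set (Int × Int))
    (hf : ∀ s x, s.Nodup → (f s x).Nodup) :
    ∀ (l : List α) (s : PySem.Set (Int × Int)), s.Nodup → (l.foldl f s).Nodup := by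
  intro l
  induction l with
  | nil => intro s hs; simpa using hs
  | cons x xs ih => intro s hs; exact ih _ (hf _ _ hs)

-- A's guarded set computes GP
lemma A_char (g w : PySem.Set (Int × Int)) (m n : Int) (c : Int × Int) :
    (∃ i, (0 ≤ i ∧ i < m) ∧ ∃ j, (0 ≤ j ∧ j < n) ∧ (i, j) ∈ g ∧ HitA g w m n i j c) ↔
      GP g w m n c := by
  obtain ⟨a, b⟩ := c
  constructor
  · rintro ⟨i, ⟨hi0, hi1⟩, j, ⟨hj0, hj1⟩, hgij, hit⟩
    rcases hit with ⟨t, ht0, ht1, hc, hch⟩ | ⟨t, ht0, ht1, hc, hch⟩ |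
        ⟨t, ht0, ht1, hc, hch⟩ | ⟨t, ht0, ht1, hc, hch⟩ <;>
      simp only [Prod.mk.injEq] at hc <;> obtain ⟨rfl, rfl⟩ := hc
    · refine ⟨⟨by omega, by omega, by omega, by omega⟩, hch t ht0 le_rfl,
        Or.inl ⟨i, by omega, by omega, hgij, Or.inr ⟨by omega, ?_⟩⟩⟩
      intro k hk1 hk2
      have h := hch (i - 1 - k) (by omega) (by omega)
      rw [show i - 1 - (i - 1 - k) = k by omega] at h
      exact h
    · refine ⟨⟨by omega, by omega, by omega, by omega⟩, hch t ht0 le_rfl,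
        Or.inr ⟨j, by omega, by omega, hgij, Or.inr ⟨by omega, ?_⟩⟩⟩
      intro k hk1 hk2
      have h := hch (j - 1 - k) (by omega) (by omega)
      rw [show j - 1 - (j - 1 - k) = k by omega] at h
      exact h
    · refine ⟨⟨by omega, by omega, by omega, by omega⟩, hch t ht0 le_rfl,
        Or.inl ⟨i, by omega, by omega, hgij, Or.inl ⟨by omega, ?_⟩⟩⟩
      intro k hk1 hk2
      have h := hch (k - i - 1) (by omega) (by omega)
      rw [show i + 1 + (k - i - 1) = k by omega] at h
      exact h
    · refine ⟨⟨by omega, by omega, by omega, by omega⟩, hch t ht0 le_rfl,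
        Or.inr ⟨j, by omega, by omega, hgij, Or.inl ⟨by omega, ?_⟩⟩⟩
      intro k hk1 hk2
      have h := hch (k - j - 1) (by omega) (by omega)
      rw [show j + 1 + (k - j - 1) = k by omega] at h
      exact h
  · rintro ⟨⟨ha0, ha1, hb0, hb1⟩, hfr, ⟨gx, hg0, hg1, hgin, ⟨hlt, hch⟩ | ⟨hlt, hch⟩⟩ |
      ⟨gy, hg0, hg1, hgin, ⟨hlt, hch⟩ | ⟨hlt, hch⟩⟩⟩
    · refine ⟨gx, ⟨hg0, hg1⟩, b, ⟨hb0, hb1⟩, hgin, Or.inr (Or.inr (Or.inl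
        ⟨a - gx - 1, by omega, by omega, by rw [show gx + 1 + (a - gx - 1) = a by omega], ?_⟩))⟩
      intro k hk0 hk1
      by_cases hk : gx + 1 + k = a
      · rw [hk]; exact hfr
      · exact hch (gx + 1 + k) (by omega) (by omega)
    · refine ⟨gx, ⟨hg0, hg1⟩, b, ⟨hb0, hb1⟩, hgin, Or.inl
        ⟨gx - 1 - a, by omega, by omega, by rw [show gx - 1 - (gx - 1 - a) = a by omega], ?_⟩⟩
      intro k hk0 hk1
      by_cases hk : gx - 1 - k = a
      · rw [hk]; exact hfr
      · exact hch (gx - 1 - k) (by omega) (by omega)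
    · refine ⟨a, ⟨ha0, ha1⟩, gy, ⟨hg0, hg1⟩, hgin, Or.inr (Or.inr (Or.inr
        ⟨b - gy - 1, by omega, by omega, by rw [show gy + 1 + (b - gy - 1) = b by omega], ?_⟩))⟩
      intro k hk0 hk1
      by_cases hk : gy + 1 + k = b
      · rw [hk]; exact hfr
      · exact hch (gy + 1 + k) (by omega) (by omega)
    · refine ⟨a, ⟨ha0, ha1⟩, gy, ⟨hg0, hg1⟩, hgin, Or.inr (Or.inl
        ⟨gy - 1 - b, by omega, by omega, by rw [show gy - 1 - (gy - 1 - b) = b by omega], ?_⟩)⟩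
      intro k hk0 hk1
      by_cases hk : gy - 1 - k = b
      · rw [hk]; exact hfr
      · exact hch (gy - 1 - k) (by omega) (by omega)

-- B's guarded set computes GP
lemma B_char (g w : PySem.Set (Int × Int)) (m n : Int) (c : Int × Int) :
    ((∃ i, (0 ≤ i ∧ i < m) ∧
        ((∃ t, 0 ≤ t ∧ t < n ∧ c = (i, t) ∧ pvFreeP g w (i, t) ∧
            ∃ u, 0 ≤ u ∧ u < t ∧ (i, u) ∈ g ∧ ∀ k, u < k → k < t → pvFreeP g w (i, k)) ∨
         (∃ t, 0 ≤ t ∧ t < n ∧ c = (i, n - 1 - t) ∧ pvFreeP g w (i, n - 1 - t) ∧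
            ∃ u, 0 ≤ u ∧ u < t ∧ (i, n - 1 - u) ∈ g ∧ ∀ k, u < k → k < t → pvFreeP g w (i, n - 1 - k)))) ∨
     (∃ j, (0 ≤ j ∧ j < n) ∧
        ((∃ t, 0 ≤ t ∧ t < m ∧ c = (t, j) ∧ pvFreeP g w (t, j) ∧
            ∃ u, 0 ≤ u ∧ u < t ∧ (u, j) ∈ g ∧ ∀ k, u < k → k < t → pvFreeP g w (k, j)) ∨
         (∃ t, 0 ≤ t ∧ t < m ∧ c = (m - 1 - t, j) ∧ pvFreeP g w (m - 1 - t, j) ∧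
            ∃ u, 0 ≤ u ∧ u < t ∧ (m - 1 - u, j) ∈ g ∧ ∀ k, u < k → k < t → pvFreeP g w (m - 1 - k, j))))) ↔
      GP g w m n c := by
  obtain ⟨a, b⟩ := c
  constructor
  · rintro (⟨i, ⟨hi0, hi1⟩, hrow⟩ | ⟨j, ⟨hj0, hj1⟩, hcol⟩)
    · rcases hrow with ⟨t, ht0, ht1, hc, hfr, u, hu0, hu1, hug, hch⟩ |
          ⟨t, ht0, ht1, hc, hfr, u, hu0, hu1, hug, hch⟩ <;>
        simp only [Prod.mk.injEq] at hc <;> obtain ⟨rfl, rfl⟩ := hc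
      · exact ⟨⟨by omega, by omega, by omega, by omega⟩, hfr,
          Or.inr ⟨u, by omega, by omega, hug, Or.inl ⟨by omega, hch⟩⟩⟩
      · refine ⟨⟨by omega, by omega, by omega, by omega⟩, hfr,
          Or.inr ⟨n - 1 - u, by omega, by omega, hug, Or.inr ⟨by omega, ?_⟩⟩⟩
        intro k hk1 hk2
        have h := hch (n - 1 - k) (by omega) (by omega)
        rw [show n - 1 - (n - 1 - k) = k by omega] at h
        exact h
    · rcases hcol with ⟨t, ht0, ht1, hc, hfr, u, hu0, hu1, hug, hch⟩ |
          ⟨t, ht0, ht1, hc, hfr, u, hu0, hu1, hug, hch⟩ <;>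
        simp only [Prod.mk.injEq] at hc <;> obtain ⟨rfl, rfl⟩ := hc
      · exact ⟨⟨by omega, by omega, by omega, by omega⟩, hfr,
          Or.inl ⟨u, by omega, by omega, hug, Or.inl ⟨by omega, hch⟩⟩⟩
      · refine ⟨⟨by omega, by omega, by omega, by omega⟩, hfr,
          Or.inl ⟨m - 1 - u, by omega, by omega, hug, Or.inr ⟨by omega, ?_⟩⟩⟩
        intro k hk1 hk2
        have h := hch (m - 1 - k) (by omega) (by omega)
        rw [show m - 1 - (m - 1 - k) = k by omega] at h
        exact h
  · rintro ⟨⟨ha0, ha1, hb0, hb1⟩, hfr, ⟨gx, hg0, hg1, hgin, ⟨hlt, hch⟩ | ⟨hlt, hch⟩⟩ |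
      ⟨gy, hg0, hg1, hgin, ⟨hlt, hch⟩ | ⟨hlt, hch⟩⟩⟩
    · exact Or.inr ⟨b, ⟨hb0, hb1⟩, Or.inl ⟨a, ha0, ha1, rfl, hfr, gx, hg0, hlt, hgin, hch⟩⟩
    · refine Or.inr ⟨b, ⟨hb0, hb1⟩, Or.inr ⟨m - 1 - a, by omega, by omega,
        by rw [show m - 1 - (m - 1 - a) = a by omega],
        by rw [show m - 1 - (m - 1 - a) = a by omega]; exact hfr,
        m - 1 - gx, by omega, by omega,
        by rw [show m - 1 - (m - 1 - gx) = gx by omega]; exact hgin, ?_⟩⟩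
      intro k hk1 hk2
      exact hch (m - 1 - k) (by omega) (by omega)
    · exact Or.inl ⟨a, ⟨ha0, ha1⟩, Or.inl ⟨b, hb0, hb1, rfl, hfr, gy, hg0, hlt, hgin, hch⟩⟩
    · refine Or.inl ⟨a, ⟨ha0, ha1⟩, Or.inr ⟨n - 1 - b, by omega, by omega,
        by rw [show n - 1 - (n - 1 - b) = b by omega],
        by rw [show n - 1 - (n - 1 - b) = b by omega]; exact hfr,
        n - 1 - gy, by omega, by omega,
        by rw [show n - 1 - (n - 1 - gy) = gy by omega]; exact hgin, ?_⟩⟩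
      intro k hk1 hk2
      exact hch (n - 1 - k) (by omega) (by omega)

-- the two guarded sets have the same length
lemma guarded_len_eq (g w : PySem.Set (Int × Int)) (m n : Int) :
    ((PySem.List.pyRange 0 m 1).foldl (fun s i =>
        (PySem.List.pyRange 0 n 1).foldl (fun s j =>
          if PySem.Set.contains g (i, j) then pvHelperA g w m n i j s else s) s)
      PySem.Set.empty).length =
    ((PySem.List.pyRange 0 n 1).foldl (fun s j =>
        pvSweep g w m (fun t => (m - 1 - t, j)) false
          (pvSweep g w m (fun t => (t, j)) false s))
      ((PySem.List.pyRange 0 m 1).foldl (fun s i =>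
        pvSweep g w n (fun t => (i, n - 1 - t)) false
          (pvSweep g w n (fun t => (i, t)) false s)) PySem.Set.empty)).length := by
  have hfA : ∀ (s : PySem.Set (Int × Int)) (i : Int) (c : Int × Int),
      c ∈ (PySem.List.pyRange 0 n 1).foldl (fun s j =>
          if PySem.Set.contains g (i, j) then pvHelperA g w m n i j s else s) s ↔
        c ∈ s ∨ ∃ j, (0 ≤ j ∧ j < n) ∧ (i, j) ∈ g ∧ HitA g w m n i j c := by
    intro s i c
    rw [mem_foldl_iff _ (fun j c => (i, j) ∈ g ∧ HitA g w m n i j c) ?_]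
    · constructor
      · rintro (h1 | ⟨j, hj, hq1, hq2⟩)
        · exact Or.inl h1
        · exact Or.inr ⟨j, (PySem.List.mem_pyRange_one).mp hj, hq1, hq2⟩
      · rintro (h1 | ⟨j, hj, hq1, hq2⟩)
        · exact Or.inl h1
        · exact Or.inr ⟨j, (PySem.List.mem_pyRange_one).mpr hj, hq1, hq2⟩
    · intro s' j c'
      by_cases hcg : PySem.Set.contains g (i, j) = true
      · have hin : (i, j) ∈ g := (PySem.Set.contains_iff g _).mp hcg
        rw [if_pos hcg, mem_pvHelperA]
        tauto
      · have hni : (i, j) ∉ g := fun hmem => hcg ((PySem.Set.contains_iff g _).mpr hmem)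
        rw [if_neg hcg]
        tauto
  have hA : ∀ c : Int × Int,
      c ∈ (PySem.List.pyRange 0 m 1).foldl (fun s i =>
          (PySem.List.pyRange 0 n 1).foldl (fun s j =>
            if PySem.Set.contains g (i, j) then pvHelperA g w m n i j s else s) s)
        PySem.Set.empty ↔ GP g w m n c := by
    intro c
    rw [mem_foldl_iff _
      (fun i c => ∃ j, (0 ≤ j ∧ j < n) ∧ (i, j) ∈ g ∧ HitA g w m n i j c) hfA]
    rw [← A_char g w m n c]
    constructor
    · rintro (h1 | ⟨i, hi, hq⟩)
      · exact absurd h1 (List.not_mem_nil)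
      · exact ⟨i, (PySem.List.mem_pyRange_one).mp hi, hq⟩
    · rintro ⟨i, hi, hq⟩
      exact Or.inr ⟨i, (PySem.List.mem_pyRange_one).mpr hi, hq⟩
  have hfRow : ∀ (s : PySem.Set (Int × Int)) (i : Int) (c : Int × Int),
      c ∈ pvSweep g w n (fun t => (i, n - 1 - t)) false
          (pvSweep g w n (fun t => (i, t)) false s) ↔
        c ∈ s ∨
          ((∃ t, 0 ≤ t ∧ t < n ∧ c = (i, t) ∧ pvFreeP g w (i, t) ∧
              ∃ u, 0 ≤ u ∧ u < t ∧ (i, u) ∈ g ∧ ∀ k, u < k → k < t → pvFreeP g w (i, k)) ∨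
           (∃ t, 0 ≤ t ∧ t < n ∧ c = (i, n - 1 - t) ∧ pvFreeP g w (i, n - 1 - t) ∧
              ∃ u, 0 ≤ u ∧ u < t ∧ (i, n - 1 - u) ∈ g ∧ ∀ k, u < k → k < t → pvFreeP g w (i, n - 1 - k))) := by
    intro s i c
    rw [mem_pvSweep_false, mem_pvSweep_false]
    exact or_assoc
  have hfCol : ∀ (s : PySem.Set (Int × Int)) (j : Int) (c : Int × Int),
      c ∈ pvSweep g w m (fun t => (m - 1 - t, j)) false
          (pvSweep g w m (fun t => (t, j)) false s) ↔
        c ∈ s ∨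
          ((∃ t, 0 ≤ t ∧ t < m ∧ c = (t, j) ∧ pvFreeP g w (t, j) ∧
              ∃ u, 0 ≤ u ∧ u < t ∧ (u, j) ∈ g ∧ ∀ k, u < k → k < t → pvFreeP g w (k, j)) ∨
           (∃ t, 0 ≤ t ∧ t < m ∧ c = (m - 1 - t, j) ∧ pvFreeP g w (m - 1 - t, j) ∧
              ∃ u, 0 ≤ u ∧ u < t ∧ (m - 1 - u, j) ∈ g ∧ ∀ k, u < k → k < t → pvFreeP g w (m - 1 - k, j))) := by
    intro s j c
    rw [mem_pvSweep_false, mem_pvSweep_false]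
    exact or_assoc
  have hB : ∀ c : Int × Int,
      c ∈ (PySem.List.pyRange 0 n 1).foldl (fun s j =>
          pvSweep g w m (fun t => (m - 1 - t, j)) false
            (pvSweep g w m (fun t => (t, j)) false s))
        ((PySem.List.pyRange 0 m 1).foldl (fun s i =>
          pvSweep g w n (fun t => (i, n - 1 - t)) false
            (pvSweep g w n (fun t => (i, t)) false s)) PySem.Set.empty) ↔
        GP g w m n c := by
    intro c
    rw [mem_foldl_iff _ _ hfCol, mem_foldl_iff _ _ hfRow]
    rw [← B_char g w m n c]
    constructor
    · rintro ((h1 | ⟨i, hi, hq⟩) | ⟨j, hj, hq⟩)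
      · exact absurd h1 (List.not_mem_nil)
      · exact Or.inl ⟨i, (PySem.List.mem_pyRange_one).mp hi, hq⟩
      · exact Or.inr ⟨j, (PySem.List.mem_pyRange_one).mp hj, hq⟩
    · rintro (⟨i, hi, hq⟩ | ⟨j, hj, hq⟩)
      · exact Or.inl (Or.inr ⟨i, (PySem.List.mem_pyRange_one).mpr hi, hq⟩)
      · exact Or.inr ⟨j, (PySem.List.mem_pyRange_one).mpr hj, hq⟩
  have ndA : ((PySem.List.pyRange 0 m 1).foldl (fun s i =>
      (PySem.List.pyRange 0 n 1).foldl (fun s j =>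
        if PySem.Set.contains g (i, j) then pvHelperA g w m n i j s else s) s)
    PySem.Set.empty).Nodup := by
    refine nodup_foldl _ ?_ _ _ List.nodup_nil
    intro s i hs
    refine nodup_foldl _ ?_ _ _ hs
    intro s' j hs'
    split
    · exact nodup_pvRay g w _ _ _ (nodup_pvRay g w _ _ _
        (nodup_pvRay g w _ _ _ (nodup_pvRay g w _ _ _ hs')))
    · exact hs'
  have ndB : ((PySem.List.pyRange 0 n 1).foldl (fun s j =>
      pvSweep g w m (fun t => (m - 1 - t, j)) false
        (pvSweep g w m (fun t => (t, j)) false s))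
    ((PySem.List.pyRange 0 m 1).foldl (fun s i =>
      pvSweep g w n (fun t => (i, n - 1 - t)) false
        (pvSweep g w n (fun t => (i, t)) false s)) PySem.Set.empty)).Nodup := by
    refine nodup_foldl _ ?_ _ _ (nodup_foldl _ ?_ _ _ List.nodup_nil)
    · intro s j hs
      exact nodup_pvSweep g w _ _ _ _ (nodup_pvSweep g w _ _ _ _ hs)
    · intro s i hs
      exact nodup_pvSweep g w _ _ _ _ (nodup_pvSweep g w _ _ _ _ hs)
  exact List.Perm.length_eq ((List.perm_ext_iff_of_nodup ndA ndB).mpr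
    (fun c => by rw [hA c, hB c]))

-- ===== VERDICT (by name: the statement is the Claim_ definition above) =====
theorem countUnguarded_v2_spec : Claim_equal_countUnguarded_v2 := by
  intro m n guards walls _ _
  have h := guarded_len_eq (pvPairs guards) (pvPairs walls) m n
  unfold Spec_countUnguarded_v2 countUnguarded_v2 countUnguarded_v2_alt
  simp only [PySem.Set.len, h]
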